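-- pv_equiv track=rewrite | github.com/KhadizaRafa/Online_Problem_Solving | Codeforces_Solutions/minimize_numbers.py | minimize_nums
-- ===== SOURCE A (Python) =====
-- def minimize_nums(n, nums):
--     counter = 1
--     while counter:
--         remainder_list = []
--         for i in range(n):
--             if nums[i] % 2 != 0:
--                 return counter - 1
--             else:
--                 remainder_list.append(nums[i] // 2)
--         nums = remainder_list
--         counter = counter + 1
-- ===== SOURCE B (Python) =====
-- def minimize_nums(n, nums):
--     # one pass: the answer is the minimum 2-adic valuation (trailing-zero count)
--     # over the (nonzero) first n elements
--     best = None
--     for v in nums[:n]: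
--         if v != 0:
--             c = 0
--             while v % 2 == 0:
--                 v //= 2
--                 c += 1
--             if best is None or c < best:
--                 best = c
--     return best
-- ===== Notes on version B (the rewrite author's own statement) =====
-- stated objective: alternative
-- what changed: Instead of repeatedly halving the whole list pass by pass until an odd element appears, B makes one pass computing each element's trailing-zero count and returns the minimum.
import Mathlib
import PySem

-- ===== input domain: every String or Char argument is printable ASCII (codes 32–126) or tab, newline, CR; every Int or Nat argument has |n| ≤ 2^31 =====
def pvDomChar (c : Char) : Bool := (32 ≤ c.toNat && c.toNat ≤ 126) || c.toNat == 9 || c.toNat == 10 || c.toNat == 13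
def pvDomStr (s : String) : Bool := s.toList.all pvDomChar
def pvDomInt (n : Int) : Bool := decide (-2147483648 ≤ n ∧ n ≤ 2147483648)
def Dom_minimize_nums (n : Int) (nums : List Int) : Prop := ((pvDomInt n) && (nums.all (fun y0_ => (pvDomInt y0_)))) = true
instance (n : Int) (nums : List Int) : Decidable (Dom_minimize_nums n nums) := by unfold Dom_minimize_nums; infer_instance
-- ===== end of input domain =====

-- B replaces A's pass-by-pass halving of the whole list with a single pass taking the
-- minimum trailing-zero count of the first n elements.

-- ===== PORT A =====
-- one 'for i in range(n)' pass: walks the first k elements in index order; returns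
-- none when it stops early (nums[i] odd — or i out of range, where Python raises
-- IndexError, excluded by Pre_), some remainder_list when the pass completes.
def minimize_inner (k : Nat) (l : List Int) : Option (List Int) :=
  match k, l with
  | 0, _ => some []
  | _+1, [] => none        -- Python: IndexError (outside Pre_)
  | k+1, v :: t =>
      if PySem.Int.mod v 2 ≠ 0 then none
      else (minimize_inner k t).map (fun r => PySem.Int.floordiv v 2 :: r)

-- the 'while counter:' loop; fuel only makes it total (Python diverges when no
-- element of the scanned prefix is ever odd — excluded by Pre_)
def minimize_loop (fuel : Nat) (counter : Int) (k : Nat) (l : List Int) : Int :=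
  match fuel with
  | 0 => 0
  | fuel+1 =>
    match minimize_inner k l with
    | none => counter - 1
    | some rem => minimize_loop fuel (counter + 1) k rem

def minimize_nums (n : Int) (nums : List Int) : Int :=
  minimize_loop 4294967296 1 n.toNat nums

-- ===== PORT B =====
-- the inner 'while v % 2 == 0' of Source B; fuel only makes it total (Source B diverges at v = 0,
-- which Source B never calls it on)
def tz_loop (fuel : Nat) (v : Int) (c : Int) : Int :=
  match fuel with
  | 0 => c
  | fuel+1 =>
      if PySem.Int.mod v 2 = 0 then tz_loop fuel (PySem.Int.floordiv v 2) (c + 1)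
      else c

-- the 'for v in nums[:n]' loop of Source B with its running best
def minimize_fold (l : List Int) (best : Option Int) : Option Int :=
  match l with
  | [] => best
  | v :: t =>
    if v ≠ 0 then
      minimize_fold t
        (match best, tz_loop 4294967296 v 0 with
         | none, c => some c
         | some b, c => if c < b then some c else some b)
    else minimize_fold t best

def minimize_nums_alt (n : Int) (nums : List Int) : Int :=
  match minimize_fold (PySem.List.slice nums none (some n)) none with
  | some b => b
  | none => 0              -- Source B returns None here (outside Pre_)

-- ===== PRECONDITION & SPEC =====
-- Pre_ is exactly where Python A returns: either 1 ≤ n ≤ len(nums) with a nonzero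
-- element among the first n (otherwise A loops forever), or n > len(nums) with an odd
-- element somewhere (then A returns 0 during the first pass; without an odd element
-- the first pass hits IndexError).
def Pre_minimize_nums (n : Int) (nums : List Int) : Prop :=
  (1 ≤ n ∧ n ≤ (nums.length : Int) ∧ ∃ v ∈ nums.take n.toNat, v ≠ 0)
  ∨ ((nums.length : Int) < n ∧ ∃ v ∈ nums, PySem.Int.mod v 2 ≠ 0)
instance (n : Int) (nums : List Int) : Decidable (Pre_minimize_nums n nums) := by
  unfold Pre_minimize_nums; infer_instance

def pvWitness_minimize_nums : Int × List Int := (2, [4, 6])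

def Spec_minimize_nums (n : Int) (nums : List Int) (out : Int) : Prop := out = minimize_nums_alt n nums
instance (n : Int) (nums : List Int) (out : Int) : Decidable (Spec_minimize_nums n nums out) := by unfold Spec_minimize_nums; infer_instance

-- ===== CLAIM (what is proved, stated in full; the proofs are below) =====
def Claim_equal_minimize_nums : Prop := ∀ (n : Int) (nums : List Int), Dom_minimize_nums n nums → Pre_minimize_nums n nums → Spec_minimize_nums n nums (minimize_nums n nums)

-- ===== LEMMAS AND PROOFS =====

-- 2-adic valuation of a positive natural (0 for 0)
def nu (k : Nat) : Nat :=
  if h : k = 0 then 0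
  else if k % 2 = 0 then nu (k / 2) + 1 else 0
termination_by k
decreasing_by omega

-- minimum of nu over the nonzero elements of a list
def minNu : List Int → Option Nat
  | [] => none
  | v :: t => if v = 0 then minNu t
      else some ((minNu t).elim (nu v.natAbs) (min (nu v.natAbs)))

theorem even_iff_natAbs (v : Int) : PySem.Int.mod v 2 = 0 ↔ v.natAbs % 2 = 0 := by
  rw [PySem.Int.mod_eq_zero_iff_dvd]; omega

theorem half_natAbs (v : Int) (h : PySem.Int.mod v 2 = 0) :
    (PySem.Int.floordiv v 2).natAbs = v.natAbs / 2 := by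
  rw [PySem.Int.mod_eq_zero_iff_dvd] at h
  rw [PySem.Int.floordiv_eq_ediv_of_pos (by omega)]
  omega

theorem half_ne_zero (v : Int) (h : PySem.Int.mod v 2 = 0) (hv : v ≠ 0) :
    PySem.Int.floordiv v 2 ≠ 0 := by
  rw [PySem.Int.mod_eq_zero_iff_dvd] at h
  rw [PySem.Int.floordiv_eq_ediv_of_pos (by omega)]
  omega

theorem nu_even (k : Nat) (hk : k ≠ 0) (he : k % 2 = 0) : nu k = nu (k / 2) + 1 := by
  rw [nu]; simp [hk, he]

theorem nu_odd (k : Nat) (he : k % 2 = 1) : nu k = 0 := by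
  rw [nu, dif_neg (by omega : ¬ k = 0), if_neg (by omega)]

theorem nu_lt (k : Nat) (hk : k ≠ 0) : nu k < k := by
  induction k using Nat.strong_induction_on with
  | _ k ih =>
    by_cases he : k % 2 = 0
    · rw [nu_even k hk he]
      have h2 : k / 2 ≠ 0 := by omega
      have := ih (k / 2) (by omega) h2
      omega
    · rw [nu_odd k (by omega)]; omega

theorem tz_spec (fuel : Nat) : ∀ (v c : Int), v ≠ 0 → nu v.natAbs < fuel →
    tz_loop fuel v c = c + (nu v.natAbs : Int) := by
  induction fuel with
  | zero => intro v c hv h; omega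
  | succ fuel ih =>
    intro v c hv h
    rw [tz_loop]
    by_cases he : PySem.Int.mod v 2 = 0
    · have hna : v.natAbs ≠ 0 := by omega
      have heq := nu_even v.natAbs hna ((even_iff_natAbs v).1 he)
      rw [if_pos he, ih _ _ (half_ne_zero v he hv)
            (by rw [half_natAbs v he]; omega),
          half_natAbs v he]
      rw [heq]; push_cast; ring
    · rw [if_neg he]
      have : v.natAbs % 2 = 1 := by
        have := (even_iff_natAbs v).2; omega
      rw [nu_odd _ this]; simp

theorem minNu_of_odd (l : List Int) (h : ∃ v ∈ l, PySem.Int.mod v 2 ≠ 0) :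
    minNu l = some 0 := by
  induction l with
  | nil => simp at h
  | cons v t ih =>
    rcases h with ⟨w, hw, hodd⟩
    rcases List.mem_cons.1 hw with rfl | hmem
    · have hv : w ≠ 0 := by
        intro h0; subst h0; simp [PySem.Int.mod] at hodd
      have : nu w.natAbs = 0 := by
        apply nu_odd; have := (even_iff_natAbs w).2; omega
      rw [minNu, if_neg hv, this]
      cases hm : minNu t <;> simp [Option.elim]
    · have := ih ⟨w, hmem, hodd⟩
      rw [minNu]
      by_cases hv : v = 0
      · simpa [hv]
      · rw [if_neg hv, this]; simp [Option.elim]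

theorem minNu_le (l : List Int) (v : Int) (hmem : v ∈ l) (hv : v ≠ 0) :
    ∃ m, minNu l = some m ∧ m ≤ nu v.natAbs := by
  induction l with
  | nil => simp at hmem
  | cons w t ih =>
    rw [minNu]
    rcases List.mem_cons.1 hmem with rfl | hmem'
    · rw [if_neg hv]
      cases hm : minNu t <;> simp [Option.elim]
    · rcases ih hmem' with ⟨m, hm, hle⟩
      by_cases hw : w = 0
      · exact ⟨m, by simp [hw, hm], hle⟩
      · rw [if_neg hw, hm]
        exact ⟨_, rfl, by simp [Option.elim]; omega⟩

theorem minNu_mem (l : List Int) : ∀ m, minNu l = some m →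
    ∃ v ∈ l, v ≠ 0 ∧ nu v.natAbs = m := by
  induction l with
  | nil => intro m h; simp [minNu] at h
  | cons w t ih =>
    intro m h
    rw [minNu] at h
    by_cases hw : w = 0
    · rw [if_pos hw] at h
      rcases ih m h with ⟨v, hv, hv0, hnu⟩
      exact ⟨v, List.mem_cons_of_mem _ hv, hv0, hnu⟩
    · rw [if_neg hw] at h
      cases hm : minNu t with
      | none => rw [hm] at h; simp [Option.elim] at h
                exact ⟨w, List.mem_cons_self, hw, h⟩
      | some m' =>
        rw [hm] at h; simp [Option.elim] at h
        by_cases hle : nu w.natAbs ≤ m'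
        · exact ⟨w, List.mem_cons_self, hw, by omega⟩
        · rcases ih m' hm with ⟨v, hv, hv0, hnu⟩
          exact ⟨v, List.mem_cons_of_mem _ hv, hv0, by omega⟩

theorem even_of_minNu_pos (l : List Int) (m : Nat) (h : minNu l = some m) (hm : 0 < m) :
    ∀ v ∈ l, PySem.Int.mod v 2 = 0 := by
  intro v hv
  by_contra hodd
  rw [minNu_of_odd l ⟨v, hv, hodd⟩] at h
  simp at h
  omega

theorem minNu_half (l : List Int) (h : ∀ v ∈ l, PySem.Int.mod v 2 = 0) :
    minNu (l.map (fun v => PySem.Int.floordiv v 2)) = (minNu l).map (fun m => m - 1) := by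
  induction l with
  | nil => simp [minNu]
  | cons v t ih =>
    have hv2 := h v List.mem_cons_self
    have iht := ih (fun w hw => h w (List.mem_cons_of_mem _ hw))
    by_cases hv : v = 0
    · subst hv
      have h0 : PySem.Int.floordiv 0 2 = 0 := by decide
      rw [List.map_cons, h0]
      show minNu (0 :: _) = _
      rw [minNu, if_pos rfl, iht]
      conv_rhs => rw [minNu, if_pos rfl]
    · have hh := half_ne_zero v hv2 hv
      have hna : v.natAbs ≠ 0 := by omega
      have hnu : nu (PySem.Int.floordiv v 2).natAbs = nu v.natAbs - 1 := by
        rw [half_natAbs v hv2, nu_even v.natAbs hna ((even_iff_natAbs v).1 hv2)]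
        omega
      have hpos : 1 ≤ nu v.natAbs := by
        rw [nu_even v.natAbs hna ((even_iff_natAbs v).1 hv2)]; omega
      rw [List.map_cons, minNu, if_neg hh, iht]
      conv_rhs => rw [minNu, if_neg hv]
      cases hm : minNu t with
      | none =>
        simp only [Option.map_none, Option.map_some, Option.elim_none]
        rw [hnu]
      | some m =>
        have hm1 : 1 ≤ m := by
          by_contra hlt
          rcases minNu_mem t m hm with ⟨w, hw, hw0, hwnu⟩
          have hw2 := h w (List.mem_cons_of_mem _ hw)
          have : w.natAbs ≠ 0 := by omega
          rw [nu_even w.natAbs this ((even_iff_natAbs w).1 hw2)] at hwnu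
          omega
        simp only [Option.map_some, Option.elim_some]
        rw [hnu]
        congr 1
        omega

theorem inner_all_even (k : Nat) : ∀ (l : List Int),
    (∀ v ∈ l.take k, PySem.Int.mod v 2 = 0) → k ≤ l.length →
    minimize_inner k l = some ((l.take k).map (fun v => PySem.Int.floordiv v 2)) := by
  induction k with
  | zero => intro l _ _; simp [minimize_inner]
  | succ k ih =>
    intro l h hk
    cases l with
    | nil => simp at hk
    | cons v t =>
      have hv := h v (by simp)
      rw [minimize_inner, if_neg (not_not_intro hv),
          ih t (fun w hw => h w (by simp [hw])) (by simpa using hk)]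
      simp

theorem inner_odd (k : Nat) : ∀ (l : List Int),
    (∃ v ∈ l.take k, PySem.Int.mod v 2 ≠ 0) → minimize_inner k l = none := by
  induction k with
  | zero => intro l h; simp at h
  | succ k ih =>
    intro l h
    cases l with
    | nil => simp at h
    | cons v t =>
      rw [minimize_inner]
      by_cases hv : PySem.Int.mod v 2 ≠ 0
      · rw [if_pos hv]
      · rw [if_neg hv]
        have : ∃ w ∈ t.take k, PySem.Int.mod w 2 ≠ 0 := by
          rcases h with ⟨w, hw, hodd⟩
          simp at hw
          rcases hw with rfl | hw'
          · exact absurd hodd hv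
          · exact ⟨w, hw', hodd⟩
        rw [ih t this]; rfl

theorem loop_spec (fuel : Nat) : ∀ (k : Nat) (l : List Int) (counter : Int) (M : Nat),
    k ≤ l.length → minNu (l.take k) = some M → M < fuel →
    minimize_loop fuel counter k l = counter - 1 + M := by
  induction fuel with
  | zero => intro _ _ _ _ _ _ h; omega
  | succ fuel ih =>
    intro k l counter M hk hM hfuel
    rw [minimize_loop]
    cases M with
    | zero =>
      rcases minNu_mem _ _ hM with ⟨v, hv, hv0, hnu⟩
      have hodd : PySem.Int.mod v 2 ≠ 0 := by
        intro he
        have hna : v.natAbs ≠ 0 := by omega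
        rw [nu_even v.natAbs hna ((even_iff_natAbs v).1 he)] at hnu
        omega
      rw [inner_odd k l ⟨v, hv, hodd⟩]
      simp
    | succ M' =>
      have heven := even_of_minNu_pos _ _ hM (by omega)
      rw [inner_all_even k l heven hk]
      have hlen : k ≤ ((l.take k).map (fun v => PySem.Int.floordiv v 2)).length := by
        simp; omega
      have htake : ((l.take k).map (fun v => PySem.Int.floordiv v 2)).take k
          = (l.take k).map (fun v => PySem.Int.floordiv v 2) := by
        apply List.take_of_length_le; simp
      have hM' : minNu (((l.take k).map (fun v => PySem.Int.floordiv v 2)).take k) = some M' := by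
        rw [htake, minNu_half _ heven, hM]; rfl
      change minimize_loop fuel (counter + 1) k ((l.take k).map (fun v => PySem.Int.floordiv v 2)) = _
      rw [ih k _ (counter + 1) M' hlen hM' (by omega)]
      push_cast; ring

theorem fold_spec (l : List Int) : ∀ (best : Option Int),
    (∀ v ∈ l, v.natAbs ≤ 2147483648) →
    minimize_fold l best =
      (minNu l).elim best (fun m => some (best.elim (m : Int) (fun b => min b (m : Int)))) := by
  induction l with
  | nil => intro best _; simp [minimize_fold, minNu]
  | cons v t ih =>
    intro best hb
    have hstep : minimize_fold (v :: t) best =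
        (if v ≠ 0 then
          minimize_fold t
            (match best, tz_loop 4294967296 v 0 with
             | none, c => some c
             | some b, c => if c < b then some c else some b)
         else minimize_fold t best) := rfl
    rw [hstep, minNu]
    by_cases hv : v = 0
    · rw [if_neg (not_not_intro hv), if_pos hv, ih best (fun w hw => hb w (by simp [hw]))]
    · have htz : tz_loop 4294967296 v 0 = (nu v.natAbs : Int) := by
        have h1 : v.natAbs ≠ 0 := by omega
        have h2 := nu_lt v.natAbs h1
        have h3 := hb v (by simp)
        rw [tz_spec 4294967296 v 0 hv (by omega)]; ring
      rw [if_pos hv, if_neg hv, ih _ (fun w hw => hb w (by simp [hw])), htz]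
      cases hm : minNu t with
      | none =>
        cases best with
        | none => simp
        | some b =>
          simp only [Option.elim]
          by_cases hlt : (nu v.natAbs : Int) < b
          · rw [if_pos hlt]; simp; omega
          · rw [if_neg hlt]; simp; omega
      | some m =>
        cases best with
        | none => simp
        | some b =>
          simp only [Option.elim]
          by_cases hlt : (nu v.natAbs : Int) < b
          · rw [if_pos hlt]; simp; omega
          · rw [if_neg hlt]; simp; omega

-- ===== VERDICT (by name: the statement is the Claim_ definition above) =====
theorem minimize_nums_spec : Claim_equal_minimize_nums := by
  intro n nums hdom hpre
  unfold Spec_minimize_nums minimize_nums minimize_nums_alt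
  have hbound : ∀ v ∈ nums, v.natAbs ≤ 2147483648 := by
    intro v hv
    unfold Dom_minimize_nums at hdom
    simp [pvDomInt, List.all_eq_true] at hdom
    have := hdom.2 v hv
    omega
  rcases hpre with ⟨hn1, hn2, v, hv, hv0⟩ | ⟨hlen, hodd⟩
  · -- 1 ≤ n ≤ len, nonzero element among the first n
    have hslice : PySem.List.slice nums none (some n) = nums.take n.toNat := by
      rw [PySem.List.slice_to nums (by omega)]
    rcases minNu_le _ v hv hv0 with ⟨M, hM, hle⟩
    have hMlt : (M : Int) < 4294967296 := by
      have h1 : v.natAbs ≠ 0 := by omega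
      have h2 := nu_lt v.natAbs h1
      have h3 := hbound v (List.mem_of_mem_take hv)
      omega
    rw [loop_spec 4294967296 n.toNat nums 1 M (by omega) hM (by omega)]
    rw [hslice, fold_spec _ none (fun w hw => hbound w (List.mem_of_mem_take hw)), hM]
    simp [Option.elim]
  · -- n > len, some odd element: A returns 0 in the first pass
    have htake : nums.take n.toNat = nums := List.take_of_length_le (by omega)
    have hslice : PySem.List.slice nums none (some n) = nums := by
      rw [PySem.List.slice_to nums (by omega), htake]
    rw [minimize_loop, inner_odd n.toNat nums (by rw [htake]; exact hodd)]
    rw [hslice, fold_spec _ none hbound, minNu_of_odd nums hodd]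
    simp [Option.elim]
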